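-- pv_equiv track=rewrite | github.com/rubenroques/goma-sportsbook-ios | Tools/XcodeCommentRemover/remove_xcode_comments.py | _detect_xcode_comment_block
-- ===== SOURCE A (Python) =====
-- from typing import List, Set, Optional, Tuple
--
-- def _detect_xcode_comment_block(content: str) -> Tuple[bool, int]:
--     """
--     Detect if the file starts with an Xcode template comment block.
--     Returns (has_comment_block, end_line_number)
--     """
--     lines = content.splitlines()
--
--     # Must start with "//"
--     if not lines or not lines[0].strip().startswith('//'):
--         return False, 0
--
--     # Look for the typical Xcode pattern:
--     # //
--     # //  FileName.swift
--     # //  ModuleName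
--     # //
--     # //  Created by Author on Date.
--     # //
--
--     comment_end = 0
--     in_comment_block = True
--     found_filename = False
--     found_created = False
--
--     for i, line in enumerate(lines):
--         stripped = line.strip()
--
--         # Empty comment line or comment with content
--         if stripped == '//' or stripped.startswith('// '):
--             comment_end = i
--
--             # Check for filename pattern (ends with .swift)
--             if '.swift' in stripped:
--                 found_filename = True
--
--             # Check for "Created by" pattern
--             if 'Created by' in stripped or 'created by' in stripped.lower():
--                 found_created = True
--
--         elif stripped == '':
--             # Empty line after comment block
--             if in_comment_block:
--                 comment_end = i
--                 break
--         else: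
--             # Non-comment line
--             break
--
--     # Only consider it an Xcode template if we found both filename and created patterns
--     is_template = found_filename and found_created and comment_end > 0
--
--     return is_template, comment_end + 1 if is_template else 0
-- ===== SOURCE B (Python) =====
-- def _classify(line):
--     """Map a line to a one-letter code: comment lines to 'b'/'s'/'d'/'c'
--     (both markers / .swift / created-by / plain), blank to 'e', other to 'x'."""
--     s = line.strip()
--     if s == '//' or s.startswith('// '):
--         swift = '.swift' in s
--         created = 'created by' in s.lower()
--         return 'b' if swift and created else 's' if swift else 'd' if created else 'c'
--     return 'e' if s == '' else 'x'
--
-- def _detect_xcode_comment_block(content):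
--     lines = content.splitlines()
--     if not lines or not lines[0].strip().startswith('//'):
--         return False, 0
--     codes = ''.join(map(_classify, lines))
--     run = len(codes) - len(codes.lstrip('bsdc'))
--     comment_end = run if codes[run:run+1] == 'e' else run - 1
--     head = codes[:run]
--     is_template = ('s' in head or 'b' in head) and ('d' in head or 'b' in head) and comment_end > 0
--     return is_template, comment_end + 1 if is_template else 0
-- ===== Notes on version B (the rewrite author's own statement) =====
-- stated objective: alternative
-- what changed: B first maps every line to a one-letter classification code ('b'/'s'/'d'/'c'/'e'/'x'), then decides everything by string operations on that code string (lstrip to find the comment run, a one-char slice for the trailing blank, membership tests for the markers), instead of A's stateful enumerate-loop with mutable flags and break.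
import Mathlib
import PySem

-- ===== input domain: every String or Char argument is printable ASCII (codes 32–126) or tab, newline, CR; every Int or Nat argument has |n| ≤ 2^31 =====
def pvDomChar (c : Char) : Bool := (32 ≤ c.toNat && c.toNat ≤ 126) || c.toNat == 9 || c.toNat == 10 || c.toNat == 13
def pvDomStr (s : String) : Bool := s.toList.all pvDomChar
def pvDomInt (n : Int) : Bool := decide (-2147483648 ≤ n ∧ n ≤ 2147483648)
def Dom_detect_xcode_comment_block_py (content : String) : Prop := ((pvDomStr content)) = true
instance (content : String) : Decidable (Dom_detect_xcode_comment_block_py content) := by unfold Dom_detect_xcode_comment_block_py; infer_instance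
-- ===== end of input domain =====

-- B maps each line to a one-letter classification code and decides everything by string operations on the code string; objective: alternative decomposition, same cost.

-- ===== PORT A =====
-- A's for-loop with break: arguments (lines-to-go, i, comment_end, in_comment_block, found_filename, found_created)
def pvALoop : List String → Int → Int → Bool → Bool → Bool → Int × Bool × Bool
  | [], _, ce, _, ff, fc => (ce, ff, fc)
  | line :: rest, i, ce, icb, ff, fc =>
    let stripped := PySem.Str.strip line
    if stripped == "//" || PySem.Str.startswith stripped "// " then
      pvALoop rest (i + 1) i icb
        (if PySem.Str.isIn ".swift" stripped then true else ff)
        (if PySem.Str.isIn "Created by" stripped || PySem.Str.isIn "created by" (PySem.Str.lower stripped) then true else fc)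
    else if stripped == "" then
      (if icb then (i, ff, fc) else pvALoop rest (i + 1) ce icb ff fc)
    else (ce, ff, fc)

def detect_xcode_comment_block_py (content : String) : Bool × Int :=
  let lines := PySem.Str.splitlines content
  match lines with
  | [] => (false, 0)
  | l0 :: _ =>
    if !(PySem.Str.startswith (PySem.Str.strip l0) "//") then (false, 0)
    else
      let r := pvALoop lines 0 0 true false false
      let is_template := r.2.1 && r.2.2 && decide (r.1 > 0)
      (is_template, if is_template then r.1 + 1 else 0)

-- ===== PORT B =====
def pvClassify (line : String) : Char :=
  let s := PySem.Str.strip line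
  if s == "//" || PySem.Str.startswith s "// " then
    let swift := PySem.Str.isIn ".swift" s
    let created := PySem.Str.isIn "created by" (PySem.Str.lower s)
    if swift && created then 'b' else if swift then 's' else if created then 'd' else 'c'
  else if s == "" then 'e' else 'x'

-- the lstrip('bsdc') character set as an explicit test
def pvInBSDC (c : Char) : Bool := c == 'b' || c == 's' || c == 'd' || c == 'c'

def detect_xcode_comment_block_py_alt (content : String) : Bool × Int :=
  match PySem.Str.splitlines content with
  | [] => (false, 0)
  | l0 :: ls =>
    if !(PySem.Str.startswith (PySem.Str.strip l0) "//") then (false, 0)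
    else
      let codes : List Char := (l0 :: ls).map pvClassify   -- ''.join(map(_classify, lines)) as its char list
      -- codes.lstrip('bsdc'): ported by hand as dropWhile over the char set (exact: lstrip(chars) drops exactly the leading chars in the set)
      let run : Int := (codes.length : Int) - ((codes.dropWhile pvInBSDC).length : Int)
      -- codes[run:run+1] == 'e'
      let comment_end : Int := if PySem.List.slice codes (some run) (some (run + 1)) == ['e'] then run else run - 1
      let head := PySem.List.slice codes none (some run)   -- codes[:run]
      -- single-char 'c in head' substring tests are exactly char membership
      let is_template := (head.contains 's' || head.contains 'b') && (head.contains 'd' || head.contains 'b') && decide (comment_end > 0)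
      (is_template, if is_template then comment_end + 1 else 0)

-- ===== PRECONDITION & SPEC =====
def Spec_detect_xcode_comment_block_py (content : String) (out : Bool × Int) : Prop := out = detect_xcode_comment_block_py_alt content
instance (content : String) (out : Bool × Int) : Decidable (Spec_detect_xcode_comment_block_py content out) := by unfold Spec_detect_xcode_comment_block_py; infer_instance

-- ===== CLAIM (what is proved, stated in full; the proofs are below) =====
def Claim_equal_detect_xcode_comment_block_py : Prop := ∀ (content : String), Dom_detect_xcode_comment_block_py content → Spec_detect_xcode_comment_block_py content (detect_xcode_comment_block_py content)

-- ===== LEMMAS AND PROOFS =====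

-- the comment-line predicate both programs test (A inline, B inside pvClassify)
def pvIsComment (l : String) : Bool :=
  PySem.Str.strip l == "//" || PySem.Str.startswith (PySem.Str.strip l) "// "

-- 'Created by' in s implies 'created by' in s.lower()
theorem pvCreated_absorb (s : String) :
    PySem.Str.isIn "Created by" s = true → PySem.Str.isIn "created by" (PySem.Str.lower s) = true := by
  intro h
  rw [PySem.Str.isIn_iff_infix] at h ⊢
  rw [PySem.Str.toList_lower]
  have hmap : ("created by".toList : List Char) = List.map PySem.Chars.lowerChar "Created by".toList := by decide
  rw [hmap]
  exact h.map PySem.Chars.lowerChar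

theorem pvCreated_or (s : String) :
    (PySem.Str.isIn "Created by" s || PySem.Str.isIn "created by" (PySem.Str.lower s))
      = PySem.Str.isIn "created by" (PySem.Str.lower s) := by
  cases h : PySem.Str.isIn "Created by" s
  · rw [Bool.false_or]
  · rw [pvCreated_absorb s h, Bool.true_or]

-- is the given optional line present and blank after stripping?
def pvBlank : Option String → Bool
  | some l => PySem.Str.strip l == ""
  | none => false

-- closed form of A's loop (with in_comment_block = true, which never changes)
theorem pvALoop_eq (lines : List String) (i ce : Int) (ff fc : Bool) :
    pvALoop lines i ce true ff fc =
      ((if pvBlank (lines.drop (lines.takeWhile pvIsComment).length).head? then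
          i + (lines.takeWhile pvIsComment).length
        else if (lines.takeWhile pvIsComment).length = 0 then ce
        else i + (lines.takeWhile pvIsComment).length - 1),
       ff || (lines.takeWhile pvIsComment).any (fun l => PySem.Str.isIn ".swift" (PySem.Str.strip l)),
       fc || (lines.takeWhile pvIsComment).any
               (fun l => PySem.Str.isIn "created by" (PySem.Str.lower (PySem.Str.strip l)))) := by
  induction lines generalizing i ce ff fc with
  | nil => simp [pvALoop, pvBlank]
  | cons l rest ih =>
    cases hp : pvIsComment l with
    | true =>
      have hp' : (PySem.Str.strip l == "//" || PySem.Str.startswith (PySem.Str.strip l) "// ") = true := hp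
      rw [List.takeWhile_cons_of_pos hp]
      simp only [pvALoop, hp', if_true, List.length_cons, List.drop_succ_cons]
      rw [ih]
      simp only [Prod.mk.injEq]
      refine ⟨?_, ?_, ?_⟩
      · split_ifs <;> (try exact (False.elim (by assumption))) <;> push_cast <;> omega
      · simp only [List.any_cons]
        cases PySem.Str.isIn ".swift" (PySem.Str.strip l) <;> simp
      · simp only [List.any_cons, pvCreated_or]
        cases PySem.Str.isIn "created by" (PySem.Str.lower (PySem.Str.strip l)) <;> simp
    | false =>
      have hp' : (PySem.Str.strip l == "//" || PySem.Str.startswith (PySem.Str.strip l) "// ") = false := hp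
      rw [List.takeWhile_cons_of_neg (by simp [hp])]
      simp only [pvALoop, hp', Bool.false_eq_true, if_false, List.length_nil, List.drop_zero,
        List.head?_cons, List.any_nil, Bool.or_false, pvBlank]
      by_cases hb : PySem.Str.strip l = ""
      · simp [hb]
      · simp [hb]

-- B's classification lands in {'b','s','d','c'} exactly on comment lines
theorem pvClassify_mem_bsdc (l : String) :
    pvInBSDC (pvClassify l) = pvIsComment l := by
  unfold pvInBSDC
  unfold pvClassify pvIsComment
  cases h : (PySem.Str.strip l == "//" || PySem.Str.startswith (PySem.Str.strip l) "// ") with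
  | true => simp only [h, if_true]; split_ifs <;> decide
  | false => simp only [h, Bool.false_eq_true, if_false]; split_ifs <;> decide

-- 's'/'b' codes in a run of comment lines = some line mentions '.swift'
theorem pvContains_swift (rs : List String) (hall : ∀ l ∈ rs, pvIsComment l = true) :
    ((rs.map pvClassify).contains 's' || (rs.map pvClassify).contains 'b')
      = rs.any (fun l => PySem.Str.isIn ".swift" (PySem.Str.strip l)) := by
  induction rs with
  | nil => rfl
  | cons l rest ih =>
    have hc : pvIsComment l = true := hall l (by simp)
    have hc' : (PySem.Str.strip l == "//" || PySem.Str.startswith (PySem.Str.strip l) "// ") = true := hc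
    have ih' := ih (fun x hx => hall x (by simp [hx]))
    simp only [List.map_cons, List.contains_cons, List.any_cons, ← ih']
    unfold pvClassify
    simp only [hc', if_true]
    cases hs : PySem.Str.isIn ".swift" (PySem.Str.strip l) <;>
      cases hcr : PySem.Str.isIn "created by" (PySem.Str.lower (PySem.Str.strip l)) <;>
      simp

-- 'd'/'b' codes in a run of comment lines = some line mentions 'created by' (lower-cased)
theorem pvContains_created (rs : List String) (hall : ∀ l ∈ rs, pvIsComment l = true) :
    ((rs.map pvClassify).contains 'd' || (rs.map pvClassify).contains 'b')
      = rs.any (fun l => PySem.Str.isIn "created by" (PySem.Str.lower (PySem.Str.strip l))) := by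
  induction rs with
  | nil => rfl
  | cons l rest ih =>
    have hc : pvIsComment l = true := hall l (by simp)
    have hc' : (PySem.Str.strip l == "//" || PySem.Str.startswith (PySem.Str.strip l) "// ") = true := hc
    have ih' := ih (fun x hx => hall x (by simp [hx]))
    simp only [List.map_cons, List.contains_cons, List.any_cons, ← ih']
    unfold pvClassify
    simp only [hc', if_true]
    cases hs : PySem.Str.isIn ".swift" (PySem.Str.strip l) <;>
      cases hcr : PySem.Str.isIn "created by" (PySem.Str.lower (PySem.Str.strip l)) <;>
      simp

-- ===== VERDICT (by name: the statement is the Claim_ definition above) =====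
theorem detect_xcode_comment_block_py_spec : Claim_equal_detect_xcode_comment_block_py := by
  intro content _
  unfold Spec_detect_xcode_comment_block_py detect_xcode_comment_block_py detect_xcode_comment_block_py_alt
  rcases hL : PySem.Str.splitlines content with _ | ⟨l0, ls⟩
  · rfl
  · cases hg : PySem.Str.startswith (PySem.Str.strip l0) "//" with
    | false => simp only [hg, Bool.not_false, if_true]
    | true =>
      simp only [hg, Bool.not_true, Bool.false_eq_true, if_false]
      rw [pvALoop_eq]
      -- abbreviations
      have htd : (l0 :: ls).takeWhile pvIsComment ++ (l0 :: ls).dropWhile pvIsComment = (l0 :: ls) :=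
        List.takeWhile_append_dropWhile
      have hdwmap : (((l0 :: ls).map pvClassify).dropWhile pvInBSDC)
          = ((l0 :: ls).dropWhile pvIsComment).map pvClassify := by
        rw [List.dropWhile_map]
        have hcomp : (pvInBSDC ∘ pvClassify : String → Bool) = pvIsComment := by
          funext l
          simp only [Function.comp_apply]
          exact pvClassify_mem_bsdc l
        rw [hcomp]
      have hlen : (l0 :: ls).length
          = ((l0 :: ls).takeWhile pvIsComment).length + ((l0 :: ls).dropWhile pvIsComment).length := by
        conv_lhs => rw [← htd]
        exact List.length_append
      have hr : (((((l0 :: ls).map pvClassify).length : Int))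
            - ((((l0 :: ls).map pvClassify).dropWhile pvInBSDC).length : Int))
          = ((((l0 :: ls).takeWhile pvIsComment).length : Nat) : Int) := by
        rw [hdwmap]
        simp only [List.length_map]
        push_cast [hlen]
        omega
      have hdropn : (l0 :: ls).drop ((l0 :: ls).takeWhile pvIsComment).length
          = (l0 :: ls).dropWhile pvIsComment :=
        calc (l0 :: ls).drop ((l0 :: ls).takeWhile pvIsComment).length
            = ((l0 :: ls).takeWhile pvIsComment ++ (l0 :: ls).dropWhile pvIsComment).drop
                ((l0 :: ls).takeWhile pvIsComment).length := by rw [htd]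
          _ = (l0 :: ls).dropWhile pvIsComment := List.drop_left
      have htaken : (l0 :: ls).take ((l0 :: ls).takeWhile pvIsComment).length
          = (l0 :: ls).takeWhile pvIsComment :=
        (List.prefix_iff_eq_take.mp (List.takeWhile_prefix pvIsComment)).symm
      have hs1 : PySem.List.slice ((l0 :: ls).map pvClassify)
            (some ((((l0 :: ls).takeWhile pvIsComment).length : Nat) : Int))
            (some (((((l0 :: ls).takeWhile pvIsComment).length : Nat) : Int) + 1))
          = (((l0 :: ls).dropWhile pvIsComment).map pvClassify).take 1 := by
        rw [show ((((l0 :: ls).takeWhile pvIsComment).length : Int) + 1)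
            = (((((l0 :: ls).takeWhile pvIsComment).length + 1 : Nat)) : Int) by push_cast; ring]
        rw [PySem.List.slice_natCast]
        rw [show ((l0 :: ls).takeWhile pvIsComment).length + 1 - ((l0 :: ls).takeWhile pvIsComment).length = 1 from by omega]
        rw [← List.map_drop, hdropn]
      have hEe : ((((l0 :: ls).dropWhile pvIsComment).map pvClassify).take 1 == ['e'])
          = pvBlank ((l0 :: ls).dropWhile pvIsComment).head? := by
        cases hdw : (l0 :: ls).dropWhile pvIsComment with
        | nil => rfl
        | cons l' rest' =>
          have hnc : pvIsComment l' = false := by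
            have := List.head?_dropWhile_not pvIsComment (l0 :: ls)
            rw [hdw] at this
            exact this
          have hnc' : (PySem.Str.strip l' == "//" || PySem.Str.startswith (PySem.Str.strip l') "// ") = false := hnc
          simp only [List.map_cons, List.take_succ_cons, List.take_zero, pvBlank, List.head?_cons]
          unfold pvClassify
          simp only [hnc', Bool.false_eq_true, if_false]
          by_cases hb : PySem.Str.strip l' = ""
          · simp [hb]
          · simp [hb]
      have hhead : PySem.List.slice ((l0 :: ls).map pvClassify) none
            (some ((((l0 :: ls).takeWhile pvIsComment).length : Nat) : Int))
          = ((l0 :: ls).takeWhile pvIsComment).map pvClassify := by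
        rw [PySem.List.slice_to_natCast, ← List.map_take, htaken]
      have hall : ∀ l ∈ (l0 :: ls).takeWhile pvIsComment, pvIsComment l = true :=
        fun l hl => List.mem_takeWhile_imp hl
      simp only [hr, hs1, hEe, hhead, hdropn, pvContains_swift _ hall, pvContains_created _ hall,
        Bool.false_or, zero_add]
      cases hbk : pvBlank ((l0 :: ls).dropWhile pvIsComment).head? with
      | true => simp only [if_true]
      | false =>
        by_cases hn : ((l0 :: ls).takeWhile pvIsComment).length = 0
        · have htw0 : (l0 :: ls).takeWhile pvIsComment = [] := List.eq_nil_iff_length_eq_zero.mpr hn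
          simp [htw0]
        · simp only [Bool.false_eq_true, if_false, hn]
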